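-- pv_equiv track=rewrite | github.com/tony-728/Algorithm | python/programmers/Lev1/옹알이(2).py | solution
-- ===== SOURCE A (Python) =====
-- def solution(babbling):
--     answer = 0
--     can_speaking = ["aya", "ye", "woo", "ma"]
--
--     for ba in babbling:
--         if ba in can_speaking:
--             answer += 1
--
--         else:
--             # 아기가 발음할 수 있는지 확인해야 한다. 같은 발음이 연속해서 등장하면 안된다.
--             new_ba = (
--                 ba.replace("aya", "1")
--                 .replace("ye", "2")
--                 .replace("woo", "3")
--                 .replace("ma", "4")
--             )
--             if new_ba.isdigit():
--                 is_continue = new_ba[0]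
--                 for i in new_ba[1:]:
--                     if is_continue == i:
--                         break
--                     else:
--                         is_continue = i
--                 else:
--                     answer += 1
--             else:
--                 continue
--     return answer
-- ===== SOURCE B (Python) =====
-- def solution(babbling):
--     codes = {"aya": "1", "ye": "2", "woo": "3", "ma": "4"}
--     count = 0
--     for word in babbling:
--         enc = []
--         i = 0
--         while i < len(word):
--             for sound, digit in codes.items():
--                 if word.startswith(sound, i):
--                     enc.append(digit)
--                     i += len(sound)
--                     break
--             else:
--                 enc.append(word[i])
--                 i += 1
--         if enc and all(c.isdigit() for c in enc) and all(
--             x != y for x, y in zip(enc, enc[1:])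
--         ):
--             count += 1
--     return count
-- ===== Notes on version B (the rewrite author's own statement) =====
-- stated objective: alternative
-- what changed: B replaces A's four sequential whole-string .replace() passes followed by isdigit() and a for/else repeat-scan with a single left-to-right scan per word that encodes each sound as its digit code (other characters pass through) and then validates that the encoding is a nonempty all-digit string with no two equal adjacent codes; exact equivalence, no precondition.
import Mathlib
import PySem

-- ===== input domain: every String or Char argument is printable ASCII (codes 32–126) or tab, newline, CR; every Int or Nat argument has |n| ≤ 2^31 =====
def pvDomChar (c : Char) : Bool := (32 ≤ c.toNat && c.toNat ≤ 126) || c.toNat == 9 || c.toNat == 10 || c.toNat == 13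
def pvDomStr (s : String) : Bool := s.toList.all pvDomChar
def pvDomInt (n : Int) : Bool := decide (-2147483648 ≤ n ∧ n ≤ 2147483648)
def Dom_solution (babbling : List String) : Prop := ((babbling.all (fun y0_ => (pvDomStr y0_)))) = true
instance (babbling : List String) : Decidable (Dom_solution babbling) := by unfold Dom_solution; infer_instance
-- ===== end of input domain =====

-- B replaces A's four sequential .replace() passes + isdigit + repeat-scan by a single
-- left-to-right scan per word that encodes each sound as its digit code, then validates
-- that the encoding is a nonempty digit string with no two equal adjacent codes.

-- ===== PORT A =====
-- the inner for/else scan of A: is_continue = nb[0]; for i in nb[1:]: break on repeat; else count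
def aScan : Char → List Char → Bool
  | _, [] => true                     -- loop finished without break: the for-else fires
  | prev, i :: rest => if prev == i then false else aScan i rest

-- loop body of A (one iteration of `for ba in babbling`)
def solutionStep (answer : Int) (ba : String) : Int :=
  if (["aya", "ye", "woo", "ma"] : List String).contains ba then answer + 1
  else
    let new_ba :=
      PySem.Str.replace (PySem.Str.replace (PySem.Str.replace
        (PySem.Str.replace ba "aya" "1") "ye" "2") "woo" "3") "ma" "4"
    if PySem.Str.strIsdigit new_ba then
      -- new_ba[0] / new_ba[1:] : isdigit guarantees new_ba nonempty, so head/tail is exact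
      match new_ba.toList with
      | c :: rest => if aScan c rest then answer + 1 else answer
      | [] => answer                  -- unreachable: "".isdigit() is False
    else answer

def solution (babbling : List String) : Int :=
  babbling.foldl solutionStep 0

-- ===== PORT B =====
-- B's while loop: encode the word in one scan (each sound -> its code, else the char itself)
def encB : List Char → List Char
  | [] => []
  | 'a' :: 'y' :: 'a' :: t => '1' :: encB t
  | 'y' :: 'e' :: t => '2' :: encB t
  | 'w' :: 'o' :: 'o' :: t => '3' :: encB t
  | 'm' :: 'a' :: t => '4' :: encB t
  | c :: t => c :: encB t

-- all(x != y for x, y in zip(enc, enc[1:]))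
def bNoRep : List Char → Bool
  | [] => true
  | [_] => true
  | a :: b :: t => a != b && bNoRep (b :: t)

-- if enc and all(c.isdigit() for c in enc) and all(x != y ...): the word counts
def validB (enc : List Char) : Bool :=
  !enc.isEmpty && (enc.all PySem.Chars.isdigit && bNoRep enc)

def solution_alt (babbling : List String) : Int :=
  babbling.foldl (fun count w => if validB (encB w.toList) then count + 1 else count) 0

-- ===== PRECONDITION & SPEC =====
def Spec_solution (babbling : List String) (out : Int) : Prop := out = solution_alt babbling
instance (babbling : List String) (out : Int) : Decidable (Spec_solution babbling out) := by unfold Spec_solution; infer_instance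

-- ===== CLAIM (what is proved, stated in full; the proofs are below) =====
def Claim_equal_solution : Prop := ∀ (babbling : List String), Dom_solution babbling → Spec_solution babbling (solution babbling)

-- ===== LEMMAS AND PROOFS =====

-- ---- generic recurrences for PySem.Chars.replace (no library lemmas exist for it) ----
lemma repl_go_acc (old new : List Char) (fuel : Nat) :
    ∀ (l acc : List Char), PySem.Chars.replace.go old new fuel l acc
      = acc.reverse ++ PySem.Chars.replace.go old new fuel l [] := by
  induction fuel with
  | zero => intro l acc; simp [PySem.Chars.replace.go]
  | succ n ih =>
    intro l acc
    cases l with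
    | nil => simp [PySem.Chars.replace.go]
    | cons c t =>
      by_cases h : old.isPrefixOf (c :: t)
      · simp only [PySem.Chars.replace.go, h, if_pos]
        rw [ih _ (new.reverse ++ acc), ih _ (new.reverse ++ [])]
        simp
      · simp only [PySem.Chars.replace.go, h, if_neg, Bool.false_eq_true, not_false_iff]
        rw [ih t (c :: acc), ih t [c]]
        simp

lemma repl_go_fuel (old new : List Char) (hold : old ≠ []) :
    ∀ (fuel : Nat) (l : List Char), l.length ≤ fuel →
      PySem.Chars.replace.go old new fuel l [] = PySem.Chars.replace.go old new l.length l [] := by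
  intro fuel
  induction fuel using Nat.strong_induction_on with
  | _ n ih =>
    intro l hl
    match n, l with
    | 0, l =>
      interval_cases hll : l.length
      simp_all
    | n + 1, [] => simp [PySem.Chars.replace.go]
    | n + 1, c :: t =>
      have hlen : 1 ≤ old.length := by
        cases old with | nil => exact absurd rfl hold | cons _ _ => simp
      simp only [List.length_cons] at hl
      by_cases h : old.isPrefixOf (c :: t)
      · have hdl : (List.drop old.length (c :: t)).length ≤ n := by
          simp only [List.length_drop, List.length_cons]; omega
        have hdl' : (List.drop old.length (c :: t)).length ≤ t.length := by
          simp only [List.length_drop, List.length_cons]; omega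
        simp only [List.length_cons, PySem.Chars.replace.go, h, if_pos]
        rw [repl_go_acc, repl_go_acc old new t.length]
        rw [ih n (by omega) _ hdl, ih t.length (by omega) _ hdl']
      · simp only [List.length_cons, PySem.Chars.replace.go, h, if_neg, Bool.false_eq_true,
          not_false_iff]
        rw [repl_go_acc old new n, repl_go_acc old new t.length]
        rw [ih n (by omega) t (by omega)]

lemma replace_nil (old new : List Char) (hold : old ≠ []) :
    PySem.Chars.replace [] old new = [] := by
  have : old.isEmpty = false := by cases old with | nil => exact absurd rfl hold | cons _ _ => rfl
  simp [PySem.Chars.replace, this, PySem.Chars.replace.go]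

lemma replace_pos (old new l : List Char) (hold : old ≠ []) (hp : old.isPrefixOf l) :
    PySem.Chars.replace l old new = new ++ PySem.Chars.replace (l.drop old.length) old new := by
  have hemp : old.isEmpty = false := by
    cases old with | nil => exact absurd rfl hold | cons _ _ => rfl
  have hlen : 1 ≤ old.length := by
    cases old with | nil => exact absurd rfl hold | cons _ _ => simp
  cases l with
  | nil =>
    cases old with
    | nil => exact absurd rfl hold
    | cons o os => simp [List.isPrefixOf] at hp
  | cons c t =>
    simp only [PySem.Chars.replace, hemp, Bool.false_eq_true, if_neg, not_false_iff,
      List.length_cons]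
    simp only [PySem.Chars.replace.go, hp, if_pos]
    rw [repl_go_acc]
    have hdl' : (List.drop old.length (c :: t)).length ≤ t.length := by
      simp only [List.length_drop, List.length_cons]; omega
    rw [repl_go_fuel old new hold t.length _ hdl']
    simp

lemma replace_neg (old new : List Char) (c : Char) (t : List Char) (hold : old ≠ [])
    (hp : ¬ old.isPrefixOf (c :: t)) :
    PySem.Chars.replace (c :: t) old new = c :: PySem.Chars.replace t old new := by
  have hemp : old.isEmpty = false := by
    cases old with | nil => exact absurd rfl hold | cons _ _ => rfl
  simp only [PySem.Chars.replace, hemp, Bool.false_eq_true, if_neg, not_false_iff,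
    List.length_cons]
  simp only [PySem.Chars.replace.go, hp, if_neg, Bool.false_eq_true, not_false_iff]
  rw [repl_go_acc]
  rw [repl_go_fuel old new hold t.length t (by omega)]
  simp

-- ---- the four passes of A, on the char-list level ----
def f1 (l : List Char) : List Char := PySem.Chars.replace l ['a','y','a'] ['1']
def f2 (l : List Char) : List Char := PySem.Chars.replace l ['y','e'] ['2']
def f3 (l : List Char) : List Char := PySem.Chars.replace l ['w','o','o'] ['3']
def f4 (l : List Char) : List Char := PySem.Chars.replace l ['m','a'] ['4']
def chain (l : List Char) : List Char := f4 (f3 (f2 (f1 l)))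

-- ---- one-pass rewrite R: what the composition of the four passes produces ----
def R : List Char → List Char
  | [] => []
  | 'a' :: 'y' :: 'a' :: t => '1' :: R t
  | 'y' :: 'e' :: t => '2' :: R t
  | 'w' :: 'o' :: 'o' :: t => '3' :: R t
  | 'm' :: 'a' :: 'y' :: 'a' :: t => 'm' :: '1' :: R t
  | 'm' :: 'a' :: t => '4' :: R t
  | c :: t => c :: R t

-- ---- head of a replace output: either the original head or the replacement char ----
lemma repl_cons_head (old : List Char) (d c : Char) (t : List Char) (hold : old ≠ []) :
    ∃ r h, PySem.Chars.replace (c :: t) old [d] = h :: r ∧ (h = c ∨ h = d) := by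
  by_cases hp : old.isPrefixOf (c :: t)
  · exact ⟨_, d, by rw [replace_pos old [d] _ hold hp]; rfl, Or.inr rfl⟩
  · exact ⟨_, c, by rw [replace_neg old [d] c t hold hp], Or.inl rfl⟩

lemma head12 (c : Char) (t : List Char) :
    ∃ r h, f2 (f1 (c :: t)) = h :: r ∧ (h = c ∨ h = '1' ∨ h = '2') := by
  obtain ⟨r, h, he, hd⟩ := repl_cons_head ['a','y','a'] '1' c t (by simp)
  rw [show f1 (c :: t) = h :: r from he]
  obtain ⟨r', h', he', hd'⟩ := repl_cons_head ['y','e'] '2' h r (by simp)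
  exact ⟨r', h', he', by rcases hd' with rfl | rfl <;> tauto⟩

lemma head123 (c : Char) (t : List Char) :
    ∃ r h, f3 (f2 (f1 (c :: t))) = h :: r ∧ (h = c ∨ h = '1' ∨ h = '2' ∨ h = '3') := by
  obtain ⟨r, h, he, hd⟩ := head12 c t
  rw [he]
  obtain ⟨r', h', he', hd'⟩ := repl_cons_head ['w','o','o'] '3' h r (by simp)
  exact ⟨r', h', he', by rcases hd' with rfl | rfl <;> tauto⟩

-- ---- step lemmas for the individual passes ----
lemma f1_aya (t : List Char) : f1 ('a' :: 'y' :: 'a' :: t) = '1' :: f1 t := by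
  unfold f1
  rw [replace_pos _ _ _ (by simp) (by simp [List.isPrefixOf])]
  rfl

lemma f2_ye (t : List Char) : f2 ('y' :: 'e' :: t) = '2' :: f2 t := by
  unfold f2
  rw [replace_pos _ _ _ (by simp) (by simp [List.isPrefixOf])]
  rfl

lemma f3_woo (t : List Char) : f3 ('w' :: 'o' :: 'o' :: t) = '3' :: f3 t := by
  unfold f3
  rw [replace_pos _ _ _ (by simp) (by simp [List.isPrefixOf])]
  rfl

lemma f4_ma (t : List Char) : f4 ('m' :: 'a' :: t) = '4' :: f4 t := by
  unfold f4
  rw [replace_pos _ _ _ (by simp) (by simp [List.isPrefixOf])]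
  rfl

lemma f1_skip {c : Char} {t : List Char} (h : ¬ (['a','y','a'] : List Char).isPrefixOf (c :: t)) :
    f1 (c :: t) = c :: f1 t := replace_neg _ _ _ _ (by simp) h

lemma f2_skip {c : Char} {t : List Char} (h : ¬ (['y','e'] : List Char).isPrefixOf (c :: t)) :
    f2 (c :: t) = c :: f2 t := replace_neg _ _ _ _ (by simp) h

lemma f3_skip {c : Char} {t : List Char} (h : ¬ (['w','o','o'] : List Char).isPrefixOf (c :: t)) :
    f3 (c :: t) = c :: f3 t := replace_neg _ _ _ _ (by simp) h

lemma f4_skip {c : Char} {t : List Char} (h : ¬ (['m','a'] : List Char).isPrefixOf (c :: t)) :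
    f4 (c :: t) = c :: f4 t := replace_neg _ _ _ _ (by simp) h

lemma f1_skip' {c : Char} (h : c ≠ 'a') (t : List Char) : f1 (c :: t) = c :: f1 t :=
  f1_skip (by simp [List.isPrefixOf]; exact fun he => (h he.symm).elim)

lemma f2_skip' {c : Char} (h : c ≠ 'y') (t : List Char) : f2 (c :: t) = c :: f2 t :=
  f2_skip (by simp [List.isPrefixOf]; exact fun he => (h he.symm).elim)

lemma f3_skip' {c : Char} (h : c ≠ 'w') (t : List Char) : f3 (c :: t) = c :: f3 t :=
  f3_skip (by simp [List.isPrefixOf]; exact fun he => (h he.symm).elim)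

lemma f4_skip' {c : Char} (h : c ≠ 'm') (t : List Char) : f4 (c :: t) = c :: f4 t :=
  f4_skip (by simp [List.isPrefixOf]; exact fun he => (h he.symm).elim)

lemma f_nil : f1 [] = [] ∧ f2 [] = [] ∧ f3 [] = [] ∧ f4 [] = [] := by
  refine ⟨?_, ?_, ?_, ?_⟩ <;> exact replace_nil _ _ (by simp)

-- all three passes after f1 keep a head that is not 'y'/'w'/'m' respectively; combined steps:
lemma chain_cons_skip {c : Char} (h1 : c ≠ 'a') (h2 : c ≠ 'y') (h3 : c ≠ 'w') (h4 : c ≠ 'm')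
    (t : List Char) : chain (c :: t) = c :: chain t := by
  unfold chain
  rw [f1_skip' h1, f2_skip' h2, f3_skip' h3, f4_skip' h4]

lemma chain_eq : ∀ l, chain l = R l := by
  intro l
  fun_induction R l with
  | case1 => simp [chain, f_nil.1, f_nil.2.1, f_nil.2.2.1, f_nil.2.2.2]
  | case2 t ih =>
    unfold chain
    rw [f1_aya, f2_skip' (by decide), f3_skip' (by decide), f4_skip' (by decide)]
    rw [show f4 (f3 (f2 (f1 t))) = chain t from rfl, ih]
  | case3 t ih =>
    unfold chain
    rw [f1_skip' (by decide), f1_skip' (by decide), f2_ye, f3_skip' (by decide),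
      f4_skip' (by decide)]
    rw [show f4 (f3 (f2 (f1 t))) = chain t from rfl, ih]
  | case4 t ih =>
    unfold chain
    rw [f1_skip' (by decide), f1_skip' (by decide), f1_skip' (by decide),
      f2_skip' (by decide), f2_skip' (by decide), f2_skip' (by decide), f3_woo,
      f4_skip' (by decide)]
    rw [show f4 (f3 (f2 (f1 t))) = chain t from rfl, ih]
  | case5 t ih =>
    unfold chain
    rw [f1_skip' (by decide), f1_aya, f2_skip' (by decide), f2_skip' (by decide),
      f3_skip' (by decide), f3_skip' (by decide),
      f4_skip (by simp [List.isPrefixOf]), f4_skip' (by decide)]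
    rw [show f4 (f3 (f2 (f1 t))) = chain t from rfl, ih]
  | case6 t x ih =>
    have hya : ¬ (['a','y','a'] : List Char).isPrefixOf ('a' :: t) := by
      rcases t with _ | ⟨c1, _ | ⟨c2, t'⟩⟩
      · simp [List.isPrefixOf]
      · simp [List.isPrefixOf]
      · simp [List.isPrefixOf]
        intro h1 h2
        exact x t' (by rw [← h1, ← h2])
    unfold chain
    rw [f1_skip' (by decide), f1_skip hya, f2_skip' (by decide), f2_skip' (by decide),
      f3_skip' (by decide), f3_skip' (by decide), f4_ma]
    rw [show f4 (f3 (f2 (f1 t))) = chain t from rfl, ih]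
  | case7 c t x4 x3 x2 x1 x0 ih =>
    rw [show c :: R t = c :: chain t by rw [ih]]
    by_cases hca : c = 'a'
    · subst hca
      have hya : ¬ (['a','y','a'] : List Char).isPrefixOf ('a' :: t) := by
        rcases t with _ | ⟨c1, _ | ⟨c2, t'⟩⟩
        · simp [List.isPrefixOf]
        · simp [List.isPrefixOf]
        · simp [List.isPrefixOf]
          intro h1 h2
          exact x4 t' rfl (by rw [← h1, ← h2])
      unfold chain
      rw [f1_skip hya, f2_skip' (by decide), f3_skip' (by decide), f4_skip' (by decide)]
    by_cases hcy : c = 'y'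
    · subst hcy
      have hf2 : ¬ (['y','e'] : List Char).isPrefixOf ('y' :: f1 t) := by
        rcases t with _ | ⟨d, t2⟩
        · simp [f_nil.1, List.isPrefixOf]
        · have hd : d ≠ 'e' := fun h => x3 t2 rfl (by rw [h])
          obtain ⟨r, h, he, hor⟩ := repl_cons_head ['a','y','a'] '1' d t2 (by simp)
          have hne : h ≠ 'e' := by rcases hor with rfl | rfl; exact hd; decide
          rw [show f1 (d :: t2) = h :: r from he]
          simp [List.isPrefixOf]
          exact fun hh => (hne hh.symm).elim
      unfold chain
      rw [f1_skip' (by decide), f2_skip hf2, f3_skip' (by decide), f4_skip' (by decide)]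
    by_cases hcw : c = 'w'
    · subst hcw
      have hf3 : ¬ (['w','o','o'] : List Char).isPrefixOf ('w' :: f2 (f1 t)) := by
        rcases t with _ | ⟨d, t2⟩
        · simp [f_nil.1, f_nil.2.1, List.isPrefixOf]
        · by_cases hd : d = 'o'
          · subst hd
            have h2 : ¬ (['o','o'] : List Char).isPrefixOf ('o' :: f2 (f1 t2)) := by
              rcases t2 with _ | ⟨e, t3⟩
              · simp [f_nil.1, f_nil.2.1, List.isPrefixOf]
              · have he' : e ≠ 'o' := fun h => x2 t3 rfl (by rw [h])
                obtain ⟨r, h, he, hor⟩ := head12 e t3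
                rw [he]
                simp [List.isPrefixOf]
                have hne : h ≠ 'o' := by
                  rcases hor with rfl | rfl | rfl; exact he'; decide; decide
                intro hh
                exact (hne hh.symm).elim
            rw [f1_skip' (by decide), f2_skip' (by decide)]
            simpa [List.isPrefixOf] using fun hh => h2 (by simpa [List.isPrefixOf] using hh)
          · obtain ⟨r, h, he, hor⟩ := head12 d t2
            rw [he]
            simp [List.isPrefixOf]
            have hne : h ≠ 'o' := by
              rcases hor with rfl | rfl | rfl; exact hd; decide; decide
            exact fun hh => (hne hh.symm).elim
      unfold chain
      rw [f1_skip' (by decide), f2_skip' (by decide), f3_skip hf3, f4_skip' (by decide)]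
    by_cases hcm : c = 'm'
    · subst hcm
      have hf4 : ¬ (['m','a'] : List Char).isPrefixOf ('m' :: f3 (f2 (f1 t))) := by
        rcases t with _ | ⟨d, t2⟩
        · simp [f_nil.1, f_nil.2.1, f_nil.2.2.1, List.isPrefixOf]
        · have hd : d ≠ 'a' := fun h => x0 t2 rfl (by rw [h])
          obtain ⟨r, h, he, hor⟩ := head123 d t2
          rw [he]
          simp [List.isPrefixOf]
          have hne : h ≠ 'a' := by
            rcases hor with rfl | rfl | rfl | rfl; exact hd; decide; decide; decide
          exact fun hh => (hne hh.symm).elim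
      unfold chain
      rw [f1_skip' (by decide), f2_skip' (by decide), f3_skip' (by decide), f4_skip hf4]
    exact chain_cons_skip hca hcy hcw hcm t

-- ---- the verdict of A's inner scan ----
def headScan : List Char → Bool
  | [] => false
  | c :: r => aScan c r

lemma aScan_eq : ∀ (l : List Char) (prev : Char), aScan prev l = bNoRep (prev :: l) := by
  intro l
  induction l with
  | nil => intro prev; rfl
  | cons i rest ih =>
    intro prev
    by_cases h : prev = i
    · simp [aScan, bNoRep, h]
    · simp [aScan, bNoRep, h, ih i]

-- ---- encB against R: same digit-validity, and equal when all-digit ----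
lemma encB_catchall {c : Char} {t : List Char}
    (h1 : ∀ t', c = 'a' → t = 'y' :: 'a' :: t' → False)
    (h2 : ∀ t', c = 'y' → t = 'e' :: t' → False)
    (h3 : ∀ t', c = 'w' → t = 'o' :: 'o' :: t' → False)
    (h4 : ∀ t', c = 'm' → t = 'a' :: t' → False) :
    encB (c :: t) = c :: encB t := by
  rw [encB.eq_def]
  split
  all_goals simp_all

lemma RE (l : List Char) :
    ((R l).all PySem.Chars.isdigit = (encB l).all PySem.Chars.isdigit)
    ∧ ((encB l).all PySem.Chars.isdigit = true → R l = encB l) := by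
  fun_induction R l with
  | case1 => simp [encB]
  | case2 t ih =>
    refine ⟨by simp [encB, ih.1], fun h => ?_⟩
    simp only [encB] at h ⊢
    simp only [List.all_cons, Bool.and_eq_true] at h
    rw [ih.2 h.2]
  | case3 t ih =>
    refine ⟨by simp [encB, ih.1], fun h => ?_⟩
    simp only [encB] at h ⊢
    simp only [List.all_cons, Bool.and_eq_true] at h
    rw [ih.2 h.2]
  | case4 t ih =>
    refine ⟨by simp [encB, ih.1], fun h => ?_⟩
    simp only [encB] at h ⊢
    simp only [List.all_cons, Bool.and_eq_true] at h
    rw [ih.2 h.2]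
  | case5 t ih =>
    -- R: 'm' :: '1' :: _, encB: '4' :: 'y' :: _ — both contain a non-digit
    have he : encB ('m' :: 'a' :: 'y' :: 'a' :: t) = '4' :: 'y' :: encB ('a' :: t) := by
      rw [show encB ('m' :: 'a' :: 'y' :: 'a' :: t) = '4' :: encB ('y' :: 'a' :: t) from rfl]
      rw [encB_catchall (by simp) (by simp) (by simp) (by simp)]
    rw [he]
    refine ⟨?_, fun h => ?_⟩
    · simp [show PySem.Chars.isdigit 'm' = false from by decide,
        show PySem.Chars.isdigit 'y' = false from by decide]
    · simp [show PySem.Chars.isdigit 'y' = false from by decide] at h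
  | case6 t x ih =>
    refine ⟨by simp [encB, ih.1], fun h => ?_⟩
    simp only [encB] at h ⊢
    simp only [List.all_cons, Bool.and_eq_true] at h
    rw [ih.2 h.2]
  | case7 c t x4 x3 x2 x1 x0 ih =>
    rw [encB_catchall x4 x3 x2 x0]
    refine ⟨by simp [ih.1], fun h => ?_⟩
    simp only [List.all_cons, Bool.and_eq_true] at h
    rw [ih.2 h.2]

-- strIsdigit, unfolded to emptiness + all-digit
lemma strIsdigit_all (l : List Char) :
    PySem.Chars.strIsdigit l = (!l.isEmpty && l.all PySem.Chars.isdigit) := by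
  cases l <;> simp [PySem.Chars.strIsdigit]

-- ---- A's if/match expression, phrased through the combined verdict ----
lemma Aexpr (ans : Int) (l : List Char) :
    (if PySem.Chars.strIsdigit (chain l) = true then
       match chain l with
       | c :: rest => if aScan c rest = true then ans + 1 else ans
       | [] => ans
     else ans)
    = (if (PySem.Chars.strIsdigit (chain l) && headScan (chain l)) = true then ans + 1
       else ans) := by
  rcases hb : PySem.Chars.strIsdigit (chain l) with _ | _
  · simp
  · cases hch : chain l with
    | nil => rw [hch] at hb; simp [PySem.Chars.strIsdigit] at hb
    | cons c r => simp [headScan]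

-- ---- the two verdicts agree on every word ----
lemma verdict_eq (l : List Char) :
    (PySem.Chars.strIsdigit (chain l) && headScan (chain l)) = validB (encB l) := by
  rw [chain_eq, strIsdigit_all]
  unfold validB
  cases hd : (encB l).all PySem.Chars.isdigit with
  | false =>
    have h1 : (R l).all PySem.Chars.isdigit = false := by rw [(RE l).1, hd]
    simp [h1]
  | true =>
    have hre : R l = encB l := (RE l).2 hd
    rw [hre, hd]
    cases hc : encB l with
    | nil => simp [headScan]
    | cons c r => simp [headScan, aScan_eq]

-- ---- char-list forms of the string literals of A ----
lemma tl_aya : ("aya" : String).toList = ['a', 'y', 'a'] := by decide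
lemma tl_1 : ("1" : String).toList = ['1'] := by decide
lemma tl_ye : ("ye" : String).toList = ['y', 'e'] := by decide
lemma tl_2 : ("2" : String).toList = ['2'] := by decide
lemma tl_woo : ("woo" : String).toList = ['w', 'o', 'o'] := by decide
lemma tl_3 : ("3" : String).toList = ['3'] := by decide
lemma tl_ma : ("ma" : String).toList = ['m', 'a'] := by decide
lemma tl_4 : ("4" : String).toList = ['4'] := by decide

lemma new_ba_toList (ba : String) :
    (PySem.Str.replace (PySem.Str.replace (PySem.Str.replace
      (PySem.Str.replace ba "aya" "1") "ye" "2") "woo" "3") "ma" "4").toList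
    = chain ba.toList := by
  simp only [PySem.Str.toList_replace, tl_aya, tl_1, tl_ye, tl_2, tl_woo, tl_3, tl_ma, tl_4]
  rfl

lemma step_eq (ans : Int) (ba : String) :
    solutionStep ans ba
      = (if validB (encB ba.toList) then ans + 1 else ans) := by
  by_cases hm : (["aya", "ye", "woo", "ma"] : List String).contains ba
  · have hmem : ba ∈ (["aya", "ye", "woo", "ma"] : List String) := by
      simpa using hm
    simp only [List.mem_cons, List.not_mem_nil, or_false] at hmem
    rcases hmem with rfl | rfl | rfl | rfl <;>
      simp [solutionStep, show validB (encB ['a','y','a']) = true from by decide,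
        show validB (encB ['y','e']) = true from by decide,
        show validB (encB ['w','o','o']) = true from by decide,
        show validB (encB ['m','a']) = true from by decide]
  · simp only [solutionStep, hm, Bool.false_eq_true, if_neg, not_false_iff]
    rw [PySem.Str.strIsdigit_eq, new_ba_toList]
    rw [Aexpr, verdict_eq]

lemma fold_eq : ∀ (l : List String) (ans : Int),
    l.foldl solutionStep ans
      = l.foldl (fun count w => if validB (encB w.toList) then count + 1 else count) ans := by
  intro l
  induction l with
  | nil => intro ans; rfl
  | cons w rest ih =>
    intro ans
    simp only [List.foldl_cons, step_eq ans w, ih]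

-- ===== VERDICT (by name: the statement is the Claim_ definition above) =====
theorem solution_spec : Claim_equal_solution := by
  intro babbling _
  unfold Spec_solution solution solution_alt
  exact fold_eq babbling 0
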